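-- pv_equiv track=rewrite | github.com/michael-diggin/fsgm | bench/python_matrix.py | gen_counts
-- ===== SOURCE A (Python) =====
-- def count(s, w):
--     count = 0
--     index = 0
--     while True:
--         index = s.find(w, index) + 1
--         if index > 0:
--             count+=1
--         else:
--             return count
--
-- def has_substring(s, w):
--     return s.find(w, 0) > -1
--
-- def gen_counts(s, w, m, chars):
--     # output is list of tuples
--     # elem 1 is the col positions
--     # elem 2 is the data/count
--     output = []
--     if len(w) == m:
--       c = count(s, w)
--       if c > 0:
--         return [([], c)]
--       return []
--
--     for i, c in enumerate(chars):
--       if has_substring(s, w+c):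
--         ret = gen_counts(s, w+c, m, chars)
--         output += [(elem1+[i], elem2) for (elem1, elem2) in ret]
--
--     return output
-- ===== SOURCE B (Python) =====
-- def gen_counts(s, w, m, chars):
--     # Count every length-m window of s that starts with w in one sliding pass,
--     # then walk the alphabet tree consulting only hash tables: a window count
--     # per word and a prefix set for pruning, so s is never rescanned.
--     cnt = {}
--     if len(w) <= m:
--         for i in range(len(s) - m + 1):
--             if s.startswith(w, i):
--                 t = s[i:i+m]
--                 cnt[t] = cnt.get(t, 0) + 1
--     prefixes = set()
--     for t in cnt:
--         for j in range(len(t) + 1):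
--             prefixes.add(t[:j])
--     out = []
--     def walk(word, path):
--         if len(word) == m:
--             if word in cnt:
--                 out.append((path, cnt[word]))
--             return
--         if word not in prefixes:
--             return
--         for i, c in enumerate(chars):
--             walk(word + c, [i] + path)
--     walk(w, [])
--     return out
-- ===== Notes on version B (the rewrite author's own statement) =====
-- stated objective: faster
-- what changed: A walks the alphabet tree rescanning s with find() at every node and counts occurrences with a find loop per leaf; B counts all length-m windows of s starting with w in one sliding pass into a dict, builds a prefix set of the counted words, and walks the tree consulting only these hash tables (index paths built by prepending), so s is never rescanned.
-- crash fix: When '' is in chars, len(w) != m and w occurs in s but no length-m substring of s starts with w, A recurses on the same arguments forever and raises RecursionError; B returns []. — e.g. on gen_counts("ab", "b", 2, ["a", ""]): A raises RecursionError, B returns []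
import Mathlib
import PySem

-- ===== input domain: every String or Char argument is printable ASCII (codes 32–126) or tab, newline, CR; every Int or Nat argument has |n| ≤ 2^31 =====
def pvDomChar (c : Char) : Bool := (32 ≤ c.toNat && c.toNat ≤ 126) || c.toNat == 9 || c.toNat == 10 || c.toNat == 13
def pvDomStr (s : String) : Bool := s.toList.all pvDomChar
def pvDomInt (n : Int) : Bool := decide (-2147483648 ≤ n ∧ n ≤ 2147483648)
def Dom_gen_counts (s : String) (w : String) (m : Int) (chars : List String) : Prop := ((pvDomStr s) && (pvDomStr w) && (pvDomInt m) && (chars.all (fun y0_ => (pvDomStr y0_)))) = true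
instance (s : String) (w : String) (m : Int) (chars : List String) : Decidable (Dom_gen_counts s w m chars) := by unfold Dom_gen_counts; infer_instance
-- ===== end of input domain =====

-- B replaces A's recursive alphabet-tree search that rescans s with find() at every
-- node by one sliding-window pass counting the length-m windows of s that start with
-- w into a dict, plus a prefix set of the counted words that prunes a hash-only tree
-- walk whose index paths are built by prepending.

-- ===== PORT A =====

-- 'while True: index = s.find(w, index) + 1; …' — fuel only makes the loop total,
-- s.length + 2 iterations always suffice (the start index grows by ≥ 1 each round)
def pvCountLoop (s w : List Char) (cnt : Int) (index : Int) : Nat → Int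
  | 0 => cnt
  | fuel + 1 =>
    let index' := PySem.Chars.findFrom s w index none + 1
    if 0 < index' then pvCountLoop s w (cnt + 1) index' fuel else cnt

def pvCount (s w : List Char) : Int := pvCountLoop s w 0 0 (s.length + 2)

def pvHasSub (s w : List Char) : Bool := decide (-1 < PySem.Chars.findFrom s w 0 none)

-- gen_counts body, recursion made total by fuel (s.length + 2 levels always suffice:
-- each recursion extends w by a nonempty piece that still fits inside s; Python
-- instead diverges when '' ∈ chars is reachable — those inputs are outside Pre_)
def genCountsAF (s : List Char) (m : Int) (chars : List (List Char)) :
    Nat → List Char → List (List Int × Int)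
  | 0, _ => []
  | fuel + 1, w =>
    if (w.length : Int) = m then
      let c := pvCount s w
      if 0 < c then [([], c)] else []
    else
      (PySem.List.enumerate chars).foldl (fun output p =>
        if p.2 ≠ [] ∧ pvHasSub s (w ++ p.2) = true then
          output ++ (genCountsAF s m chars fuel (w ++ p.2)).map (fun e => (e.1 ++ [p.1], e.2))
        else output) []

def genCountsA (s : List Char) (m : Int) (chars : List (List Char)) (w : List Char) :
    List (List Int × Int) :=
  genCountsAF s m chars (s.length + 2) w

def gen_counts (s : String) (w : String) (m : Int) (chars : List String) : List (List Int × Int) :=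
  genCountsA s.toList m (chars.map String.toList) w.toList

-- ===== PORT B =====

-- cnt = {}
-- if len(w) <= m:
--     for i in range(len(s) - m + 1):
--         if s.startswith(w, i): t = s[i:i+m]; cnt[t] = cnt.get(t, 0) + 1
-- s.startswith(w, i) is s[i:].startswith(w) — exact here since i ranges over 0 ≤ i
def cntB (s w : List Char) (m : Int) : PySem.Dict (List Char) Int :=
  if (w.length : Int) ≤ m then
    (PySem.List.pyRange 0 ((s.length : Int) - m + 1)).foldl (fun d i =>
      if PySem.Chars.startswith (PySem.List.slice s (some i) none) w = true then
        d.insert (PySem.List.slice s (some i) (some (i + m)))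
          (d.getD (PySem.List.slice s (some i) (some (i + m))) 0 + 1)
      else d) PySem.Dict.empty
  else PySem.Dict.empty

-- prefixes = set(); for t in cnt: for j in range(len(t)+1): prefixes.add(t[:j])
def prefixesB (cnt : PySem.Dict (List Char) Int) : PySem.Set (List Char) :=
  cnt.keys.foldl (fun P t =>
    (PySem.List.pyRange 0 ((t.length : Int) + 1)).foldl
      (fun P j => PySem.Set.add P (PySem.List.slice t none (some j))) P)
    PySem.Set.empty

-- def walk(word, path): … — fuel only makes the recursion total; on inputs in Pre_
-- every recursive call extends word by a nonempty alphabet entry that still fits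
-- inside s, so s.length + 2 levels suffice
def walkF (m : Int) (chars : List (List Char)) (cnt : PySem.Dict (List Char) Int)
    (prefixes : PySem.Set (List Char)) :
    Nat → List Char → List Int → List (List Int × Int) → List (List Int × Int)
  | 0, _, _, out => out
  | fuel + 1, word, path, out =>
    if (word.length : Int) = m then
      if cnt.contains word = true then out ++ [(path, cnt.getD word 0)] else out
    else
      if PySem.Set.contains prefixes word = true then
        (PySem.List.enumerate chars).foldl (fun out p =>
          walkF m chars cnt prefixes fuel (word ++ p.2) (p.1 :: path) out) out
      else out

def genCountsB (s w : List Char) (m : Int) (chars : List (List Char)) : List (List Int × Int) :=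
  walkF m chars (cntB s w m) (prefixesB (cntB s w m)) (s.length + 2) w [] []

def gen_counts_alt (s : String) (w : String) (m : Int) (chars : List String) : List (List Int × Int) :=
  genCountsB s.toList w.toList m (chars.map String.toList)

-- ===== PRECONDITION & SPEC =====
-- Pre_ excludes exactly the inputs on which the Python A never returns: with '' in
-- chars, a w of another length than m that occurs in s makes gen_counts recurse on
-- itself forever (RecursionError).
def Pre_gen_counts (s : String) (w : String) (m : Int) (chars : List String) : Prop :=
  ¬ ("" ∈ chars ∧ PySem.Str.len w ≠ m ∧ PySem.Str.isIn w s = true)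
instance (s : String) (w : String) (m : Int) (chars : List String) : Decidable (Pre_gen_counts s w m chars) := by unfold Pre_gen_counts; infer_instance

def pvWitness_gen_counts : String × String × Int × List String := ("abab", "a", 2, ["a", "b"])

-- A raises RecursionError when '' ∈ chars, len(w) ≠ m and w occurs in s but no
-- length-m substring of s starts with w; B returns [] there.
def Raises_gen_counts (s : String) (w : String) (m : Int) (chars : List String) : Prop :=
  "" ∈ chars ∧ PySem.Str.len w ≠ m ∧ PySem.Str.isIn w s = true ∧
    ∀ i ∈ List.range (s.toList.length + 1),
      ¬ (((PySem.List.slice s.toList (some (i : Int)) (some ((i : Int) + m))).length : Int) = m ∧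
        PySem.Chars.startswith (PySem.List.slice s.toList (some (i : Int)) (some ((i : Int) + m))) w.toList = true)
instance (s : String) (w : String) (m : Int) (chars : List String) : Decidable (Raises_gen_counts s w m chars) := by unfold Raises_gen_counts; infer_instance

def pvRaiseWitness_gen_counts : String × String × Int × List String := ("ab", "b", 2, ["a", ""])
def pvRaiseWitnessOut_gen_counts : List (List Int × Int) := []

def Spec_gen_counts (s : String) (w : String) (m : Int) (chars : List String) (out : List (List Int × Int)) : Prop := out = gen_counts_alt s w m chars
instance (s : String) (w : String) (m : Int) (chars : List String) (out : List (List Int × Int)) : Decidable (Spec_gen_counts s w m chars out) := by unfold Spec_gen_counts; infer_instance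

-- ===== CLAIM (what is proved, stated in full; the proofs are below) =====
def Claim_equal_gen_counts : Prop := ∀ (s : String) (w : String) (m : Int) (chars : List String), Dom_gen_counts s w m chars → Pre_gen_counts s w m chars → Spec_gen_counts s w m chars (gen_counts s w m chars)

def Claim_raises_gen_counts : Prop := (∀ (s : String) (w : String) (m : Int) (chars : List String), Dom_gen_counts s w m chars → Raises_gen_counts s w m chars → ¬ Pre_gen_counts s w m chars) ∧ (Dom_gen_counts (pvRaiseWitness_gen_counts.1) (pvRaiseWitness_gen_counts.2.1) (pvRaiseWitness_gen_counts.2.2.1) (pvRaiseWitness_gen_counts.2.2.2) ∧ Raises_gen_counts (pvRaiseWitness_gen_counts.1) (pvRaiseWitness_gen_counts.2.1) (pvRaiseWitness_gen_counts.2.2.1) (pvRaiseWitness_gen_counts.2.2.2) ∧ gen_counts_alt (pvRaiseWitness_gen_counts.1) (pvRaiseWitness_gen_counts.2.1) (pvRaiseWitness_gen_counts.2.2.1) (pvRaiseWitness_gen_counts.2.2.2) = pvRaiseWitnessOut_gen_counts)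

-- ===== LEMMAS AND PROOFS =====

-- number of occurrence positions of w in s at index ≥ k (overlapping, as A counts)
def countFrom (s w : List Char) (k : Nat) : Nat :=
  (List.range (s.length + 1 - k)).countP (fun j => decide (w <+: List.drop (k + j) s))

lemma infix_drop_of_prefix_drop {s w : List Char} {k j : Nat} (h : w <+: List.drop (k + j) s) :
    w <:+: List.drop k s := by
  have hd : List.drop (k + j) s = List.drop j (List.drop k s) := (List.drop_drop).symm
  exact ((hd ▸ h).isInfix).trans (List.drop_suffix j (List.drop k s)).isInfix

lemma countFrom_eq_zero {s w : List Char} {k : Nat} (h : ¬ w <:+: List.drop k s) :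
    countFrom s w k = 0 := by
  refine List.countP_eq_zero.2 ?_
  intro j hj
  simp only [decide_eq_true_eq]
  exact fun hpre => h (infix_drop_of_prefix_drop hpre)

lemma countFrom_split (s w : List Char) (k : Nat) (hk : k ≤ s.length)
    (hf : 0 ≤ PySem.Chars.find (List.drop k s) w) :
    countFrom s w k = 1 + countFrom s w (k + (PySem.Chars.find (List.drop k s) w).toNat + 1) := by
  set u := List.drop k s with hu
  set f := (PySem.Chars.find u w).toNat with hfdef
  obtain ⟨hpre, hmin⟩ := PySem.Chars.find_spec hf
  have hfle : f ≤ s.length - k := by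
    have hle := PySem.Chars.find_le_length u w
    have hul : u.length = s.length - k := by simp [hu]
    omega
  have hL : s.length + 1 - k = (f + 1) + (s.length + 1 - (k + f + 1)) := by omega
  unfold countFrom
  rw [hL, List.range_add, List.countP_append]
  have h1 : (List.range (f + 1)).countP (fun j => decide (w <+: List.drop (k + j) s)) = 1 := by
    rw [List.range_succ, List.countP_append, List.countP_singleton]
    have hpf : w <+: List.drop (k + f) s := by
      rw [← List.drop_drop (j := k) (i := f)]; exact hpre
    have h0 : (List.range f).countP (fun j => decide (w <+: List.drop (k + j) s)) = 0 := by
      refine List.countP_eq_zero.2 ?_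
      intro j hj
      simp only [decide_eq_true_eq]
      intro hc
      refine hmin j (List.mem_range.1 hj) ?_
      rw [List.drop_drop (j := k) (i := j)]; exact hc
    simp [h0, hpf]
  rw [h1]
  congr 1
  rw [List.countP_map]
  refine List.countP_congr ?_
  intro j hj
  simp only [Function.comp]
  have harith : k + (f + 1 + j) = k + f + 1 + j := by omega
  rw [harith]

lemma countFrom_pos_iff (s w : List Char) : 0 < countFrom s w 0 ↔ w <:+: s := by
  constructor
  · intro h
    rcases List.countP_pos_iff.1 h with ⟨j, hj, hpj⟩
    simp only [decide_eq_true_eq] at hpj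
    simpa using infix_drop_of_prefix_drop (k := 0) hpj
  · intro h
    obtain ⟨j, hj⟩ := (PySem.Chars.exists_prefix_drop_iff_isIn w s).2
      ((PySem.Chars.isIn_iff_infix w s).2 h)
    have hj2 : w <+: List.drop (min j s.length) s := by
      rcases le_or_gt j s.length with hle | hgt
      · simpa [min_eq_left hle] using hj
      · have hnil : List.drop j s = [] := List.drop_eq_nil_of_le (by omega)
        have hw : w = [] := List.prefix_nil.1 (hnil ▸ hj)
        simp [hw]
    refine List.countP_pos_iff.2 ⟨min j s.length, ?_, ?_⟩
    · exact List.mem_range.2 (by omega)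
    · simpa using hj2

lemma findFrom_last (s w : List Char) :
    PySem.Chars.findFrom s w ((s.length : Int) + 1) none = -1 := by
  simp only [PySem.Chars.findFrom]
  rw [if_neg (show ¬((s.length : Int) + 1 < 0) by omega)]
  rw [if_pos (show ((s.length : Int) < (s.length : Int) + 1) by omega)]

lemma pvCountLoop_eq (s w : List Char) :
    ∀ (fuel k : Nat) (cnt : Int), k ≤ s.length + 1 → s.length + 1 - k < fuel →
      pvCountLoop s w cnt (k : Int) fuel = cnt + (countFrom s w k : Int) := by
  intro fuel
  induction fuel with
  | zero => intro k cnt hk hf; omega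
  | succ fuel ih =>
    intro k cnt hk hf
    rcases Nat.lt_or_ge k (s.length + 1) with hlt | hge
    · have hk' : k ≤ s.length := by omega
      simp only [pvCountLoop]
      rw [PySem.Chars.findFrom_natCast s w k hk']
      rcases eq_or_ne (PySem.Chars.find (List.drop k s) w) (-1) with hfind | hfind
      · rw [hfind]
        norm_num
        have hz : countFrom s w k = 0 :=
          countFrom_eq_zero ((PySem.Chars.find_eq_neg_one_iff _ _).1 hfind)
        rw [hz]
      · rw [if_neg hfind]
        have hnn : 0 ≤ PySem.Chars.find (List.drop k s) w := by
          have := PySem.Chars.neg_one_le_find (List.drop k s) w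
          omega
        set f := (PySem.Chars.find (List.drop k s) w).toNat with hfd
        have hfval : PySem.Chars.find (List.drop k s) w = (f : Int) :=
          (Int.toNat_of_nonneg hnn).symm
        have hfle : f ≤ s.length - k := by
          have hle := PySem.Chars.find_le_length (List.drop k s) w
          have hul : (List.drop k s).length = s.length - k := by simp
          omega
        have hpos : (0 : Int) < ↑k + PySem.Chars.find (List.drop k s) w + 1 := by
          rw [hfval]; positivity
        rw [if_pos hpos]
        have hidx : (↑k + PySem.Chars.find (List.drop k s) w + 1 : Int) =
            ((k + f + 1 : Nat) : Int) := by rw [hfval]; push_cast; ring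
        rw [hidx, ih (k + f + 1) (cnt + 1) (by omega) (by omega)]
        have hsplit := countFrom_split s w k (by omega) hnn
        rw [← hfd] at hsplit
        rw [hsplit]
        push_cast
        ring
    · have hkeq : k = s.length + 1 := by omega
      subst hkeq
      simp only [pvCountLoop]
      have hcast : ((s.length + 1 : Nat) : Int) = (s.length : Int) + 1 := by push_cast; ring
      rw [hcast, findFrom_last]
      norm_num
      have hz : countFrom s w (s.length + 1) = 0 := by
        unfold countFrom
        simp
      rw [hz]

lemma pvCount_eq (s w : List Char) : pvCount s w = (countFrom s w 0 : Int) := by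
  have h := pvCountLoop_eq s w (s.length + 2) 0 0 (by omega) (by omega)
  simpa [pvCount] using h

lemma infix_of_pvHasSub {s u : List Char} (h : pvHasSub s u = true) : u <:+: s := by
  have : -1 < PySem.Chars.find s u := by simpa [pvHasSub] using h
  exact (PySem.Chars.find_nonneg_iff s u).1 (by omega)

lemma pvHasSub_iff {s u : List Char} : pvHasSub s u = true ↔ u <:+: s := by
  unfold pvHasSub
  rw [PySem.Chars.findFrom_zero, decide_eq_true_iff]
  constructor
  · intro h; exact (PySem.Chars.find_nonneg_iff s u).1 (by omega)
  · intro h; have := (PySem.Chars.find_nonneg_iff s u).2 h; omega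

lemma genCountsAF_congr (s : List Char) (m : Int) (chars : List (List Char)) :
    ∀ (f1 f2 : Nat) (w : List Char), s.length + 1 - w.length < f1 → s.length + 1 - w.length < f2 →
      genCountsAF s m chars f1 w = genCountsAF s m chars f2 w := by
  intro f1
  induction f1 with
  | zero => intro f2 w h1 h2; omega
  | succ f1 ih =>
    intro f2 w h1 h2
    cases f2 with
    | zero => omega
    | succ f2 =>
      simp only [genCountsAF]
      split
      · rfl
      · apply PySem.List.foldl_congr_mem
        intro acc p hp
        by_cases hg : p.2 ≠ [] ∧ pvHasSub s (w ++ p.2) = true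
        · rw [if_pos hg, if_pos hg]
          have hinf : (w ++ p.2).length ≤ s.length := (infix_of_pvHasSub hg.2).length_le
          have hc : p.2.length ≠ 0 := fun hn => hg.1 (List.eq_nil_of_length_eq_zero hn)
          simp only [List.length_append] at hinf
          rw [ih f2 (w ++ p.2) (by simp [List.length_append]; omega)
            (by simp [List.length_append]; omega)]
        · rw [if_neg hg, if_neg hg]

lemma genCountsA_unfold (s : List Char) (m : Int) (chars : List (List Char)) (w : List Char) :
    genCountsA s m chars w =
      if (w.length : Int) = m then
        (if 0 < pvCount s w then [([], pvCount s w)] else [])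
      else (PySem.List.enumerate chars).flatMap (fun p =>
        if p.2 ≠ [] ∧ pvHasSub s (w ++ p.2) = true then
          (genCountsA s m chars (w ++ p.2)).map (fun e => (e.1 ++ [p.1], e.2))
        else []) := by
  unfold genCountsA
  rw [show genCountsAF s m chars (s.length + 2) w =
      (if (w.length : Int) = m then
        (if 0 < pvCount s w then [([], pvCount s w)] else [])
      else (PySem.List.enumerate chars).foldl (fun output p =>
        if p.2 ≠ [] ∧ pvHasSub s (w ++ p.2) = true then
          output ++ (genCountsAF s m chars (s.length + 1) (w ++ p.2)).map (fun e => (e.1 ++ [p.1], e.2))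
        else output) []) from rfl]
  split
  · rfl
  · have hstep : ∀ (acc : List (List Int × Int)) (p : Int × List Char),
        p ∈ PySem.List.enumerate chars →
        (if p.2 ≠ [] ∧ pvHasSub s (w ++ p.2) = true then
          acc ++ (genCountsAF s m chars (s.length + 1) (w ++ p.2)).map (fun e => (e.1 ++ [p.1], e.2))
        else acc) =
        acc ++ (if p.2 ≠ [] ∧ pvHasSub s (w ++ p.2) = true then
          (genCountsAF s m chars (s.length + 2) (w ++ p.2)).map (fun e => (e.1 ++ [p.1], e.2))
        else []) := by
      intro acc p hp
      by_cases hg : p.2 ≠ [] ∧ pvHasSub s (w ++ p.2) = true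
      · rw [if_pos hg, if_pos hg]
        have hc : p.2.length ≠ 0 := fun hn => hg.1 (List.eq_nil_of_length_eq_zero hn)
        rw [genCountsAF_congr s m chars (s.length + 1) (s.length + 2) (w ++ p.2)
          (by simp [List.length_append]; omega) (by simp [List.length_append]; omega)]
      · rw [if_neg hg, if_neg hg]
        simp
    exact Eq.trans (PySem.List.foldl_congr_mem _ _ _ _ hstep)
      (by rw [PySem.List.foldl_append_eq_flatMap]; simp)

-- the windows B's first loop counts, as a filtered map over the start positions
def pvWnd (s : List Char) (m : Int) (j : Nat) : List Char :=
  PySem.List.slice s (some (j : Int)) (some ((j : Int) + m))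

def pvWins (s w : List Char) (m : Int) : List (List Char) :=
  ((List.range (s.length + 1)).filter (fun j => decide (((pvWnd s m j).length : Int) = m ∧
    PySem.Chars.startswith (pvWnd s m j) w = true))).map (pvWnd s m)

lemma foldl_ite_insert {ι κ : Type} [BEq κ] (P : ι → Prop) [DecidablePred P] (f : ι → κ) :
    ∀ (l : List ι) (d : PySem.Dict κ Int),
      l.foldl (fun d i => if P i then d.insert (f i) (d.getD (f i) 0 + 1) else d) d
      = ((l.filter (fun i => decide (P i))).map f).foldl (fun d x => d.insert x (d.getD x 0 + 1)) d := by
  intro l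
  induction l with
  | nil => intro d; rfl
  | cons i l ih =>
    intro d
    by_cases h : P i <;> simp [h, ih]

lemma pvWnd_eq_take (s : List Char) {m : Int} (hm0 : 0 ≤ m) (j : Nat) :
    pvWnd s m j = List.take m.toNat (List.drop j s) := by
  have hcast : (j : Int) + m = ((j + m.toNat : Nat) : Int) := by
    push_cast [Int.toNat_of_nonneg hm0]; ring
  unfold pvWnd
  rw [hcast, PySem.List.slice_natCast, Nat.add_sub_cancel_left]

lemma cntB_eq (s w : List Char) (m : Int) : cntB s w m = PySem.Dict.counter (pvWins s w m) := by
  unfold cntB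
  by_cases hwm : (w.length : Int) ≤ m
  · rw [if_pos hwm]
    have hm0 : 0 ≤ m := le_trans (Int.natCast_nonneg w.length) hwm
    have hmt : (m.toNat : Int) = m := Int.toNat_of_nonneg hm0
    by_cases hms : m ≤ (s.length : Int)
    · rw [show (s.length : Int) - m + 1 = ((s.length + 1 - m.toNat : Nat) : Int) by omega]
      rw [PySem.List.pyRange_zero_natCast, List.foldl_map]
      have hwnd : ∀ j : Nat, PySem.List.slice s (some (j : Int)) (some ((j : Int) + m)) = pvWnd s m j :=
        fun _ => rfl
      simp only [hwnd]
      rw [foldl_ite_insert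
        (fun j : Nat => PySem.Chars.startswith (PySem.List.slice s (some (j : Int)) none) w = true)
        (pvWnd s m)]
      rw [PySem.Dict.foldl_insert_getD_add_one_eq_counter]
      congr 1
      unfold pvWins
      rw [show s.length + 1 = (s.length + 1 - m.toNat) + m.toNat by omega, List.range_add,
        List.filter_append, List.map_append]
      have h2 : (List.filter (fun j => decide (((pvWnd s m j).length : Int) = m ∧
          PySem.Chars.startswith (pvWnd s m j) w = true))
          ((List.range m.toNat).map (fun x => (s.length + 1 - m.toNat) + x))) = [] := by
        rw [List.filter_eq_nil_iff]
        intro j hj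
        obtain ⟨k, hk, rfl⟩ := List.mem_map.1 hj
        have hk' : k < m.toNat := List.mem_range.1 hk
        simp only [decide_eq_true_eq, not_and]
        intro hlen
        exfalso
        rw [pvWnd_eq_take s hm0] at hlen
        have hle : (List.take m.toNat (List.drop (s.length + 1 - m.toNat + k) s)).length =
            min m.toNat (s.length - (s.length + 1 - m.toNat + k)) := by simp
        omega
      rw [h2]
      simp only [List.map_nil, List.append_nil, Nat.add_sub_cancel]
      refine congrArg (List.map (pvWnd s m)) (List.filter_congr ?_)
      intro j hj
      have hjN : j < s.length + 1 - m.toNat := List.mem_range.1 hj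
      have hfull : (pvWnd s m j).length = m.toNat := by
        rw [pvWnd_eq_take s hm0]; simp; omega
      rw [decide_eq_decide]
      rw [PySem.List.slice_from_natCast]
      rw [PySem.Chars.startswith_iff, PySem.Chars.startswith_iff, pvWnd_eq_take s hm0,
        List.prefix_take_iff]
      constructor
      · intro h
        refine ⟨by rw [← pvWnd_eq_take s hm0 j, hfull]; exact hmt, h, by omega⟩
      · rintro ⟨-, h, -⟩
        exact h
    · rw [PySem.List.pyRange_one_eq_nil (by omega)]
      have hnil : pvWins s w m = [] := by
        unfold pvWins
        rw [show (List.filter (fun j => decide (((pvWnd s m j).length : Int) = m ∧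
            PySem.Chars.startswith (pvWnd s m j) w = true)) (List.range (s.length + 1))) = []
          from List.filter_eq_nil_iff.2 ?_]
        · rfl
        · intro j hj
          simp only [decide_eq_true_eq, not_and]
          intro hlen
          exfalso
          rw [pvWnd_eq_take s hm0] at hlen
          have hle : (List.take m.toNat (List.drop j s)).length =
              min m.toNat (s.length - j) := by simp
          omega
      rw [hnil]
      rfl
  · rw [if_neg hwm]
    have hnil : pvWins s w m = [] := by
      unfold pvWins
      rw [show (List.filter (fun j => decide (((pvWnd s m j).length : Int) = m ∧
          PySem.Chars.startswith (pvWnd s m j) w = true)) (List.range (s.length + 1))) = []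
        from List.filter_eq_nil_iff.2 ?_]
      · rfl
      · intro j hj
        simp only [decide_eq_true_eq, not_and]
        intro hlen hsw
        have hpre := (PySem.Chars.startswith_iff _ _).1 hsw
        have := hpre.length_le
        omega
    rw [hnil]
    rfl

lemma window_eq_iff {s t : List Char} {m : Int} {j : Nat} (ht : (t.length : Int) = m) :
    pvWnd s m j = t ↔ t <+: List.drop j s := by
  have hm0 : 0 ≤ m := by omega
  have hcast : (j : Int) + m = ((j + m.toNat : Nat) : Int) := by
    push_cast [Int.toNat_of_nonneg hm0]; ring
  unfold pvWnd
  rw [hcast, PySem.List.slice_natCast, Nat.add_sub_cancel_left]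
  constructor
  · rintro rfl; exact List.take_prefix _ _
  · intro hp
    have hlen : t.length = m.toNat := by omega
    rw [List.prefix_iff_eq_take] at hp
    rw [← hlen]
    exact hp.symm

lemma mem_pvWins {s w t : List Char} {m : Int} :
    t ∈ pvWins s w m ↔ (t.length : Int) = m ∧ w <+: t ∧ t <:+: s := by
  unfold pvWins
  simp only [List.mem_map, List.mem_filter, List.mem_range, decide_eq_true_eq]
  constructor
  · rintro ⟨j, ⟨hjn, htl, hsw⟩, rfl⟩
    refine ⟨htl, (PySem.Chars.startswith_iff _ _).1 hsw, ?_⟩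
    have hpre := (window_eq_iff htl).1 rfl
    exact hpre.isInfix.trans (List.drop_suffix j s).isInfix
  · rintro ⟨htl, hw, hinf⟩
    obtain ⟨j, hj⟩ := (PySem.Chars.exists_prefix_drop_iff_isIn t s).2
      ((PySem.Chars.isIn_iff_infix t s).2 hinf)
    have hj2 : t <+: List.drop (min j s.length) s := by
      rcases le_or_gt j s.length with hle | hgt
      · simpa [min_eq_left hle] using hj
      · have hnil : List.drop j s = [] := List.drop_eq_nil_of_le (by omega)
        have hwnil : t = [] := List.prefix_nil.1 (hnil ▸ hj)
        simp [hwnil]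
    refine ⟨min j s.length, ⟨by omega, ?_, ?_⟩, (window_eq_iff htl).2 hj2⟩
    · rw [(window_eq_iff htl).2 hj2]; exact htl
    · rw [(window_eq_iff htl).2 hj2]; exact (PySem.Chars.startswith_iff _ _).2 hw

lemma count_pvWins {s w t : List Char} {m : Int}
    (htl : (t.length : Int) = m) (hw : w <+: t) :
    (pvWins s w m).count t = countFrom s t 0 := by
  unfold pvWins
  rw [List.count_eq_countP, List.countP_map, List.countP_filter]
  unfold countFrom
  rw [Nat.sub_zero]
  refine List.countP_congr ?_
  intro j hj
  simp only [Function.comp, Nat.zero_add]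
  by_cases hpre : t <+: List.drop j s
  · have heq := (window_eq_iff htl).2 hpre
    rw [heq]
    simp [htl, (PySem.Chars.startswith_iff _ _).2 hw, hpre]
  · have hne : pvWnd s m j ≠ t := fun h => hpre ((window_eq_iff htl).1 h)
    simp only [Bool.and_eq_true, beq_iff_eq, decide_eq_true_eq]
    constructor
    · rintro ⟨h1, -⟩; exact absurd h1 hne
    · intro h; exact absurd h hpre

lemma mem_foldl_add {α β : Type} [BEq α] [LawfulBEq α] (g : β → α) :
    ∀ (l : List β) (P : PySem.Set α) (x : α),
      x ∈ l.foldl (fun P y => PySem.Set.add P (g y)) P ↔ x ∈ P ∨ ∃ y ∈ l, x = g y := by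
  intro l
  induction l with
  | nil => intro P x; simp
  | cons y l ih =>
    intro P x
    rw [List.foldl_cons, ih]
    simp only [PySem.Set.mem_add, List.mem_cons]
    constructor
    · rintro (( h | h ) | ⟨z, hz, rfl⟩)
      · exact Or.inl h
      · exact Or.inr ⟨y, Or.inl rfl, h⟩
      · exact Or.inr ⟨z, Or.inr hz, rfl⟩
    · rintro (h | ⟨z, (rfl | hz), rfl⟩)
      · exact Or.inl (Or.inl h)
      · exact Or.inl (Or.inr rfl)
      · exact Or.inr ⟨z, hz, rfl⟩

lemma mem_inner_prefixes (t : List Char) (P : PySem.Set (List Char)) (x : List Char) :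
    x ∈ (PySem.List.pyRange 0 ((t.length : Int) + 1)).foldl
      (fun P j => PySem.Set.add P (PySem.List.slice t none (some j))) P ↔ x ∈ P ∨ x <+: t := by
  rw [show ((t.length : Int) + 1) = ((t.length + 1 : Nat) : Int) by push_cast; ring]
  rw [PySem.List.pyRange_zero_natCast, List.foldl_map,
    mem_foldl_add (fun k : Nat => PySem.List.slice t none (some (k : Int)))]
  simp only [PySem.List.slice_to_natCast, List.mem_range]
  constructor
  · rintro (h | ⟨j, hj, rfl⟩)
    · exact Or.inl h
    · exact Or.inr (List.take_prefix j t)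
  · rintro (h | h)
    · exact Or.inl h
    · exact Or.inr ⟨x.length, by have := h.length_le; omega,
        (List.prefix_iff_eq_take.1 h)⟩

lemma mem_prefixesB (cnt : PySem.Dict (List Char) Int) (x : List Char) :
    x ∈ prefixesB cnt ↔ ∃ t ∈ cnt.keys, x <+: t := by
  unfold prefixesB
  have h : ∀ (l : List (List Char)) (P : PySem.Set (List Char)),
      x ∈ l.foldl (fun P t => (PySem.List.pyRange 0 ((t.length : Int) + 1)).foldl
        (fun P j => PySem.Set.add P (PySem.List.slice t none (some j))) P) P ↔
      x ∈ P ∨ ∃ t ∈ l, x <+: t := by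
    intro l
    induction l with
    | nil => intro P; simp
    | cons t l ih =>
      intro P
      rw [List.foldl_cons, ih, mem_inner_prefixes]
      simp only [List.mem_cons]
      constructor
      · rintro ((h | h) | ⟨z, hz, hxz⟩)
        · exact Or.inl h
        · exact Or.inr ⟨t, Or.inl rfl, h⟩
        · exact Or.inr ⟨z, Or.inr hz, hxz⟩
      · rintro (h | ⟨z, (rfl | hz), hxz⟩)
        · exact Or.inl (Or.inl h)
        · exact Or.inl (Or.inr hxz)
        · exact Or.inr ⟨z, hz, hxz⟩
  rw [h]
  simp [PySem.Set.empty]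

lemma genCountsA_nil (s : List Char) (m : Int) (chars : List (List Char)) :
    ∀ (N : Nat) (u : List Char), s.length + 1 - u.length ≤ N →
      (¬ ∃ t, (t.length : Int) = m ∧ u <+: t ∧ t <:+: s) → genCountsA s m chars u = [] := by
  intro N
  induction N using Nat.strong_induction_on with
  | _ N ih =>
  intro u hN hno
  rw [genCountsA_unfold]
  by_cases hm2 : (u.length : Int) = m
  · rw [if_pos hm2]
    have hnpos : ¬ 0 < pvCount s u := by
      rw [pvCount_eq]
      intro h
      have hinf := (countFrom_pos_iff s u).1 (by exact_mod_cast h)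
      exact hno ⟨u, hm2, List.prefix_refl u, hinf⟩
    rw [if_neg hnpos]
  · rw [if_neg hm2]
    refine List.flatMap_eq_nil_iff.2 ?_
    intro p hp
    by_cases hg : p.2 ≠ [] ∧ pvHasSub s (u ++ p.2) = true
    · rw [if_pos hg]
      have hinf := infix_of_pvHasSub hg.2
      have hlen : u.length + p.2.length ≤ s.length := by
        have := hinf.length_le; simpa [List.length_append] using this
      have hc : p.2.length ≠ 0 := fun h0 => hg.1 (List.eq_nil_of_length_eq_zero h0)
      have hmeas : s.length + 1 - (u ++ p.2).length < N := by
        simp only [List.length_append]; omega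
      rw [ih _ hmeas (u ++ p.2) (le_refl _)
        (fun ⟨t, htl, hpre, htinf⟩ => hno ⟨t, htl, (List.prefix_append u p.2).trans hpre, htinf⟩)]
      simp
    · rw [if_neg hg]

lemma walkF_eq (s w : List Char) (m : Int) (chars : List (List Char))
    (hpre : ¬ ([] ∈ chars ∧ (w.length : Int) ≠ m ∧ w <:+: s)) :
    ∀ (fuel : Nat) (u : List Char) (path : List Int) (out : List (List Int × Int)),
      w <+: u → s.length + 1 - u.length < fuel →
      walkF m chars (cntB s w m) (prefixesB (cntB s w m)) fuel u path out
        = out ++ (genCountsA s m chars u).map (fun e => (e.1 ++ path, e.2)) := by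
  have hpfx : ∀ x : List Char, PySem.Set.contains (prefixesB (cntB s w m)) x = true ↔
      ∃ t, (t.length : Int) = m ∧ w <+: t ∧ t <:+: s ∧ x <+: t := by
    intro x
    have h1 : PySem.Set.contains (prefixesB (cntB s w m)) x = true ↔
        x ∈ prefixesB (cntB s w m) := by simp [PySem.Set.contains]
    rw [h1, mem_prefixesB, cntB_eq, PySem.Dict.keys_counter]
    constructor
    · rintro ⟨t, ht, hxt⟩
      have := mem_pvWins.1 ((PySem.Set.mem_ofList _ _).1 ht)
      exact ⟨t, this.1, this.2.1, this.2.2, hxt⟩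
    · rintro ⟨t, h1, h2, h3, h4⟩
      exact ⟨t, (PySem.Set.mem_ofList _ _).2 (mem_pvWins.2 ⟨h1, h2, h3⟩), h4⟩
  intro fuel
  induction fuel with
  | zero => intro u path out hwu hf; omega
  | succ fuel ih =>
    intro u path out hwu hf
    rw [genCountsA_unfold]
    simp only [walkF]
    by_cases hm : (u.length : Int) = m
    · rw [if_pos hm, if_pos hm]
      by_cases hin : (cntB s w m).contains u = true
      · rw [if_pos hin]
        have humem : u ∈ pvWins s w m := by
          rw [cntB_eq, PySem.Dict.contains_counter] at hin
          exact List.contains_iff_mem.1 hin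
        have hinf := (mem_pvWins.1 humem).2.2
        have hcpos : 0 < countFrom s u 0 := (countFrom_pos_iff s u).2 hinf
        have hpos : 0 < pvCount s u := by rw [pvCount_eq]; exact_mod_cast hcpos
        rw [if_pos hpos]
        have hval : (cntB s w m).getD u 0 = pvCount s u := by
          rw [cntB_eq, PySem.Dict.getD_counter, count_pvWins hm hwu, pvCount_eq]
        rw [hval]
        simp
      · rw [if_neg hin]
        have hninf : ¬ u <:+: s := by
          intro hinf
          exact hin (by
            rw [cntB_eq, PySem.Dict.contains_counter]
            exact List.contains_iff_mem.2 (mem_pvWins.2 ⟨hm, hwu, hinf⟩))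
        have hnpos : ¬ 0 < pvCount s u := by
          rw [pvCount_eq]
          intro h
          exact hninf ((countFrom_pos_iff s u).1 (by exact_mod_cast h))
        rw [if_neg hnpos]
        simp
    · rw [if_neg hm, if_neg hm]
      by_cases hupfx : PySem.Set.contains (prefixesB (cntB s w m)) u = true
      · rw [if_pos hupfx]
        have hstep : ∀ (acc : List (List Int × Int)) (p : Int × List Char),
            p ∈ PySem.List.enumerate chars →
            walkF m chars (cntB s w m) (prefixesB (cntB s w m)) fuel (u ++ p.2) (p.1 :: path) acc =
            acc ++ (if p.2 ≠ [] ∧ pvHasSub s (u ++ p.2) = true then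
              (genCountsA s m chars (u ++ p.2)).map (fun e => (e.1 ++ [p.1], e.2))
            else []).map (fun e => (e.1 ++ path, e.2)) := by
          intro acc p hp
          have hcmem : p.2 ∈ chars := by
            obtain ⟨k, hk, hpk⟩ := (PySem.List.mem_enumerate_iff chars 0 p).1 hp
            rw [hpk]
            exact List.getElem_mem hk
          have hwuc : w <+: u ++ p.2 := hwu.trans (List.prefix_append u p.2)
          by_cases hB : PySem.Set.contains (prefixesB (cntB s w m)) (u ++ p.2) = true
          · obtain ⟨t, htl, hwt, htinf, hut⟩ := (hpfx (u ++ p.2)).1 hB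
            by_cases hcnil : p.2 = []
            · exfalso
              rw [hcnil, List.append_nil] at hut
              rcases not_and_or.1 hpre with hnc | hrest
              · exact hnc (hcnil ▸ hcmem)
              rcases not_and_or.1 hrest with hwm | hnis
              · have hwm' : (w.length : Int) = m := not_not.1 hwm
                by_cases huw : u = w
                · exact hm (huw ▸ hwm')
                · have hlt : w.length < u.length := by
                    have hle := hwu.length_le
                    rcases Nat.lt_or_ge w.length u.length with h | h
                    · exact h
                    · exact absurd (List.IsPrefix.eq_of_length hwu (by omega)).symm huw
                  have h1 := hut.length_le
                  omega
              · exact hnis ((hwu.trans hut).isInfix.trans htinf)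
            · have hclen : 1 ≤ p.2.length := by
                have : p.2.length ≠ 0 := fun h0 => hcnil (List.eq_nil_of_length_eq_zero h0)
                omega
              have hlenle : u.length + p.2.length ≤ s.length := by
                have h1 := hut.length_le
                have h2 := htinf.length_le
                simp only [List.length_append] at h1
                omega
              rw [ih (u ++ p.2) (p.1 :: path) acc hwuc
                (by simp only [List.length_append]; omega)]
              have hA : p.2 ≠ [] ∧ pvHasSub s (u ++ p.2) = true :=
                ⟨hcnil, pvHasSub_iff.2 (hut.isInfix.trans htinf)⟩
              rw [if_pos hA]
              congr 1
              rw [List.map_map]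
              refine List.map_congr_left ?_
              intro e he
              simp [List.append_assoc]
          · -- the extended word is a prefix of no counted window: the child call
            -- falls through immediately, and A's subtree is empty as well
            have hnoT : ¬ ∃ t, (t.length : Int) = m ∧ u ++ p.2 <+: t ∧ t <:+: s := by
              rintro ⟨t, htl, hpre2, htinf⟩
              exact hB ((hpfx (u ++ p.2)).2 ⟨t, htl, hwuc.trans hpre2, htinf, hpre2⟩)
            have hchild : walkF m chars (cntB s w m) (prefixesB (cntB s w m)) fuel
                (u ++ p.2) (p.1 :: path) acc = acc := by
              cases fuel with
              | zero => rfl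
              | succ f =>
                simp only [walkF]
                by_cases hm2 : ((u ++ p.2).length : Int) = m
                · rw [if_pos hm2]
                  have hnin : ¬ (cntB s w m).contains (u ++ p.2) = true := by
                    intro hin
                    rw [cntB_eq, PySem.Dict.contains_counter] at hin
                    have := mem_pvWins.1 (List.contains_iff_mem.1 hin)
                    exact hnoT ⟨u ++ p.2, this.1, List.prefix_refl _, this.2.2⟩
                  rw [if_neg hnin]
                · rw [if_neg hm2, if_neg hB]
            rw [hchild]
            have hGnil : (if p.2 ≠ [] ∧ pvHasSub s (u ++ p.2) = true then
                (genCountsA s m chars (u ++ p.2)).map (fun e => (e.1 ++ [p.1], e.2))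
              else []) = [] := by
              by_cases hA : p.2 ≠ [] ∧ pvHasSub s (u ++ p.2) = true
              · rw [if_pos hA,
                  genCountsA_nil s m chars (s.length + 1 - (u ++ p.2).length) (u ++ p.2)
                    (le_refl _) hnoT]
                rfl
              · rw [if_neg hA]
            rw [hGnil]
            simp
        rw [PySem.List.foldl_congr_mem _ _ _ _ hstep, PySem.List.foldl_append_eq_flatMap,
          List.map_flatMap]
      · rw [if_neg hupfx]
        have hnil : genCountsA s m chars u = [] := by
          refine genCountsA_nil s m chars (s.length + 1 - u.length) u (le_refl _) ?_
          rintro ⟨t, htl, hpre2, htinf⟩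
          exact hupfx ((hpfx u).2 ⟨t, htl, hwu.trans hpre2, htinf, hpre2⟩)
        rw [genCountsA_unfold, if_neg hm] at hnil
        rw [hnil]
        simp

lemma genCountsB_eq (s w : List Char) (m : Int) (chars : List (List Char))
    (hpre : ¬ ([] ∈ chars ∧ (w.length : Int) ≠ m ∧ w <:+: s)) :
    genCountsB s w m chars = genCountsA s m chars w := by
  unfold genCountsB
  rw [walkF_eq s w m chars hpre (s.length + 2) w [] [] (List.prefix_refl w) (by omega)]
  simp

-- ===== VERDICT (by name: the statement is the Claim_ definition above) =====
theorem gen_counts_spec : Claim_equal_gen_counts := by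
  intro s w m chars _ hpre
  unfold Spec_gen_counts gen_counts gen_counts_alt
  refine (genCountsB_eq s.toList w.toList m (chars.map String.toList) ?_).symm
  rintro ⟨hnil, hlen, hinf⟩
  refine hpre ⟨?_, ?_, ?_⟩
  · obtain ⟨a, ha, hae⟩ := List.mem_map.1 hnil
    rwa [← String.toList_eq_nil_iff.1 hae]
  · simpa [PySem.Str.len] using hlen
  · rw [show PySem.Str.isIn w s = PySem.Chars.isIn w.toList s.toList by simp [PySem.Str.isIn]]
    exact (PySem.Chars.isIn_iff_infix _ _).2 hinf

@[simp] theorem gen_counts_raises : Claim_raises_gen_counts := by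
  unfold Claim_raises_gen_counts
  refine ⟨?_, by decide, by decide, by decide⟩
  intro s w m chars _ hr hp
  exact hp ⟨hr.1, hr.2.1, hr.2.2.1⟩
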